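-- pv_equiv track=rewrite | github.com/0-5788719150923125/praxis | praxis/interface/rendering/differential.py | _find_line_changes
-- ===== SOURCE A (Python) =====
-- from typing import List, Optional
--
-- def _find_line_changes(old_line: str, new_line: str) -> List[tuple]:
--     """
--     Find contiguous blocks of changes in a line.
--     Returns list of (start_col, end_col, new_text) tuples.
--     """
--     if old_line == new_line:
--         return []
--
--     changes = []
--     max_len = max(len(old_line), len(new_line))
--
--     # Pad lines for comparison
--     old_padded = old_line.ljust(max_len)
--     new_padded = new_line.ljust(max_len)
--
--     # Find change blocks
--     in_change = False
--     change_start = 0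
--
--     for i in range(max_len):
--         old_char = old_padded[i] if i < len(old_padded) else ' '
--         new_char = new_padded[i] if i < len(new_padded) else ' '
--
--         if old_char != new_char:
--             if not in_change:
--                 change_start = i
--                 in_change = True
--         else:
--             if in_change:
--                 # End of change block
--                 changes.append((
--                     change_start,
--                     i,
--                     new_padded[change_start:i]
--                 ))
--                 in_change = False
--
--     # Handle change extending to end
--     if in_change:
--         changes.append((
--             change_start,
--             max_len,
--             new_padded[change_start:].rstrip()
--         ))
--
--     return changes
-- ===== SOURCE B (Python) =====
-- from typing import List
--
--
-- def _find_line_changes(old_line: str, new_line: str) -> List[tuple]: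
--     """Two-phase version: collect differing column indices, then group
--     maximal runs of consecutive indices into blocks."""
--     if old_line == new_line:
--         return []
--
--     max_len = max(len(old_line), len(new_line))
--     old_p = old_line.ljust(max_len)
--     new_p = new_line.ljust(max_len)
--
--     diff = [i for i in range(max_len) if old_p[i] != new_p[i]]
--
--     blocks = []
--     k = 0
--     while k < len(diff):
--         j = k
--         while j + 1 < len(diff) and diff[j + 1] == diff[j] + 1:
--             j += 1
--         start, end = diff[k], diff[j] + 1
--         text = new_p[start:end]
--         if end == max_len:
--             text = text.rstrip()
--         blocks.append((start, end, text))
--         k = j + 1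
--     return blocks
-- ===== Notes on version B (the rewrite author's own statement) =====
-- stated objective: alternative
-- what changed: Replaces A's single-pass in_change flag automaton with a two-phase decomposition: first collect the list of all differing column indices, then group maximal runs of consecutive indices into (start, end, text) blocks.
import Mathlib
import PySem

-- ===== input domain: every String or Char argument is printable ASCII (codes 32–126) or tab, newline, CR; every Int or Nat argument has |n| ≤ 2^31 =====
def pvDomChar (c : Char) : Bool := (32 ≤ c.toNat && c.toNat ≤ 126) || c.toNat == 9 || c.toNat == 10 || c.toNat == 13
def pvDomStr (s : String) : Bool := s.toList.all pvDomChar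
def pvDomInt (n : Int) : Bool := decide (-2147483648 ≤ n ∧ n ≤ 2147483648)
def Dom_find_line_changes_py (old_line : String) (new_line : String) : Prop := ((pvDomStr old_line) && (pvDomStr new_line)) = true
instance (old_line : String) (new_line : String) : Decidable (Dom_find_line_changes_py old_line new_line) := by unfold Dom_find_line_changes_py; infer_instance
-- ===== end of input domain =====

-- B replaces A's in_change flag automaton by a two-phase decomposition (collect differing
-- column indices, then group maximal consecutive runs); same cost, proved equal everywhere.


-- ===== PORT A =====
-- s.ljust(w): pad on the right with spaces to width w
def pyLjust (cs : List Char) (w : Nat) : List Char := cs ++ List.replicate (w - cs.length) ' '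

-- one iteration of A's `for i in range(max_len)` loop; state = (changes, in_change, change_start)
def aStep (oP nP : List Char) (s : List (Int × Int × String) × Bool × Int) (i : Int) :
    List (Int × Int × String) × Bool × Int :=
  let oc : Char := if i < (oP.length : Int) then PySem.List.pyGetD oP i ' ' else ' '
  let nc : Char := if i < (nP.length : Int) then PySem.List.pyGetD nP i ' ' else ' '
  if oc ≠ nc then
    (if s.2.1 = false then (s.1, true, i) else s)
  else
    (if s.2.1 = true then
      (s.1 ++ [(s.2.2, i, String.ofList (PySem.List.slice nP (some s.2.2) (some i)))], false, s.2.2)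
     else s)

-- A's trailing `if in_change:` block after the loop
def aFinish (nP : List Char) (maxLen : Int) (s : List (Int × Int × String) × Bool × Int) :
    List (Int × Int × String) :=
  if s.2.1 = true then
    s.1 ++ [(s.2.2, maxLen, String.ofList (PySem.Chars.rstrip (PySem.List.slice nP (some s.2.2) none)))]
  else s.1

def find_line_changes_py (old_line : String) (new_line : String) : List (Int × Int × String) :=
  if old_line == new_line then []
  else
    let maxLen : Int := max (PySem.Str.len old_line) (PySem.Str.len new_line)
    let oP := pyLjust old_line.toList maxLen.toNat
    let nP := pyLjust new_line.toList maxLen.toNat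
    aFinish nP maxLen
      ((PySem.List.pyRange 0 maxLen 1).foldl (aStep oP nP) ([], false, 0))

-- ===== PORT B =====
-- inner while loop of B: starting from prev, consume the run of consecutive indices
def bChomp (prev : Int) (rest : List Int) : Int × List Int :=
  match rest with
  | [] => (prev, [])
  | x :: t => if x = prev + 1 then bChomp x t else (prev, x :: t)

-- termination measure for bBlocks (cited by its decreasing_by)
theorem bChomp_snd_length (prev : Int) (rest : List Int) :
    (bChomp prev rest).2.length ≤ rest.length := by
  induction rest generalizing prev with
  | nil => simp [bChomp]
  | cons x t ih =>
    simp only [bChomp]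
    split
    · exact le_trans (ih x) (Nat.le_succ _)
    · simp

-- outer while loop of B: group the diff indices into maximal consecutive runs
def bBlocks (nP : List Char) (maxLen : Int) (diff : List Int) : List (Int × Int × String) :=
  match diff with
  | [] => []
  | a :: t =>
    let c := bChomp a t
    let e := c.1 + 1
    let text := PySem.List.slice nP (some a) (some e)
    (a, e, String.ofList (if e = maxLen then PySem.Chars.rstrip text else text)) ::
      bBlocks nP maxLen c.2
termination_by diff.length
decreasing_by
  simp only [List.length_cons]
  exact Nat.lt_succ_of_le (bChomp_snd_length a t)

def find_line_changes_py_alt (old_line : String) (new_line : String) : List (Int × Int × String) :=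
  if old_line == new_line then []
  else
    let maxLen : Int := max (PySem.Str.len old_line) (PySem.Str.len new_line)
    let oP := pyLjust old_line.toList maxLen.toNat
    let nP := pyLjust new_line.toList maxLen.toNat
    let diff := (PySem.List.pyRange 0 maxLen 1).filter
      (fun i => decide (PySem.List.pyGetD oP i ' ' ≠ PySem.List.pyGetD nP i ' '))
    bBlocks nP maxLen diff

-- ===== PRECONDITION & SPEC =====
def Spec_find_line_changes_py (old_line : String) (new_line : String) (out : List (Int × Int × String)) : Prop := out = find_line_changes_py_alt old_line new_line
instance (old_line : String) (new_line : String) (out : List (Int × Int × String)) : Decidable (Spec_find_line_changes_py old_line new_line out) := by unfold Spec_find_line_changes_py; infer_instance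

-- ===== CLAIM (what is proved, stated in full; the proofs are below) =====
def Claim_equal_find_line_changes_py : Prop := ∀ (old_line : String) (new_line : String), Dom_find_line_changes_py old_line new_line → Spec_find_line_changes_py old_line new_line (find_line_changes_py old_line new_line)

-- ===== LEMMAS AND PROOFS =====

theorem length_pyLjust (cs : List Char) (w : Nat) (h : cs.length ≤ w) :
    (pyLjust cs w).length = w := by
  simp [pyLjust]; omega

-- bChomp eats exactly a run of consecutive indices when whatever follows is beyond its end
theorem bChomp_run (m : Nat) : ∀ (p : Int) (rest : List Int),
    (∀ x ∈ rest, p + 1 + (m : Int) < x) →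
    bChomp p (PySem.List.pyRange (p + 1) (p + 1 + (m : Int)) 1 ++ rest) = (p + m, rest) := by
  induction m with
  | zero =>
    intro p rest h
    rw [PySem.List.pyRange_one_eq_nil (by omega)]
    cases rest with
    | nil => simp [bChomp]
    | cons x t =>
      have := h x (by simp)
      simp only [List.nil_append, bChomp]
      rw [if_neg (by omega)]
      simp
  | succ m ih =>
    intro p rest h
    rw [PySem.List.pyRange_one_cons (by push_cast; omega)]
    simp only [List.cons_append, bChomp, if_true]
    have h' : ∀ x ∈ rest, (p + 1) + 1 + (m : Int) < x := by
      intro x hx; have := h x hx; push_cast at this ⊢; omega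
    have heq := ih (p + 1) rest h'
    rw [show p + 1 + ((m : Nat) + 1 : Nat) = (p + 1) + 1 + (m : Int) by push_cast; ring]
    rw [heq, Prod.mk.injEq]
    refine ⟨by push_cast; ring, rfl⟩

theorem mem_filter_range_lt {oP nP : List Char} {k n x : Int}
    (hx : x ∈ (PySem.List.pyRange k n 1).filter
      (fun i => decide (PySem.List.pyGetD oP i ' ' ≠ PySem.List.pyGetD nP i ' '))) :
    k ≤ x := by
  rcases List.mem_filter.mp hx with ⟨hm, _⟩
  exact (PySem.List.mem_pyRange_one.mp hm).1

-- the main invariant: A's flag-automaton loop (from column k on, in either flag state)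
-- produces exactly B's grouping of the remaining differing indices
theorem loop_eq (m : Nat) : ∀ (oP nP : List Char) (n : Nat), oP.length = n → nP.length = n →
    ∀ k : Int, 0 ≤ k → k + m = n →
    (∀ (acc : List (Int × Int × String)) (c : Int),
      aFinish nP (n : Int) ((PySem.List.pyRange k (n : Int) 1).foldl (aStep oP nP) (acc, false, c))
        = acc ++ bBlocks nP (n : Int) ((PySem.List.pyRange k (n : Int) 1).filter
            (fun i => decide (PySem.List.pyGetD oP i ' ' ≠ PySem.List.pyGetD nP i ' '))))
    ∧ (∀ (acc : List (Int × Int × String)) (cs : Int), 0 ≤ cs → cs < k →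
      aFinish nP (n : Int) ((PySem.List.pyRange k (n : Int) 1).foldl (aStep oP nP) (acc, true, cs))
        = acc ++ bBlocks nP (n : Int) (PySem.List.pyRange cs k 1 ++
            (PySem.List.pyRange k (n : Int) 1).filter
            (fun i => decide (PySem.List.pyGetD oP i ' ' ≠ PySem.List.pyGetD nP i ' ')))) := by
  induction m with
  | zero =>
    intro oP nP n h1 h2 k hk0 hkn
    have hk : k = (n : Int) := by omega
    subst hk
    rw [PySem.List.pyRange_one_eq_nil (le_refl _)]
    constructor
    · intro acc c; simp [aFinish, bBlocks]
    · intro acc cs hcs0 hcsk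
      simp only [List.foldl_nil, List.filter_nil, List.append_nil]
      -- A side: close the open run with the rstripped tail slice
      have hL : aFinish nP (n : Int) (acc, true, cs)
          = acc ++ [(cs, (n : Int), String.ofList (PySem.Chars.rstrip (PySem.List.slice nP (some cs) none)))] := by
        simp [aFinish]
      rw [hL]
      -- B side: the whole remaining range is one consecutive run ending at n
      have hrun := bChomp_run (((n : Int) - cs - 1).toNat) cs ([] : List Int) (by simp)
      rw [show cs + 1 + ((((n : Int) - cs - 1).toNat : Nat) : Int) = (n : Int) by omega,
        List.append_nil] at hrun
      rw [PySem.List.pyRange_one_cons hcsk, bBlocks, hrun]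
      have he : cs + (((( n : Int) - cs - 1).toNat : Nat) : Int) + 1 = (n : Int) := by omega
      -- the two texts agree: slice to the end = slice to length n
      have hslice : PySem.List.slice nP (some cs) (some ((n : Int))) = PySem.List.slice nP (some cs) none := by
        rw [PySem.List.slice_toNat nP hcs0 (by positivity), PySem.List.slice_from nP hcs0]
        apply List.take_of_length_le
        simp [h2]
      rw [he, hslice]
      simp [bBlocks]
  | succ m ih =>
    intro oP nP n h1 h2 k hk0 hkn
    have hklt : k < (n : Int) := by omega
    have hIH := ih oP nP n h1 h2 (k + 1) (by omega) (by omega)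
    rw [PySem.List.pyRange_one_cons hklt]
    -- the two in-bounds guards in aStep are true at i = k
    have hgo : (if k < (oP.length : Int) then PySem.List.pyGetD oP k ' ' else ' ') = PySem.List.pyGetD oP k ' ' := by
      rw [if_pos (by rw [h1]; omega)]
    have hgn : (if k < (nP.length : Int) then PySem.List.pyGetD nP k ' ' else ' ') = PySem.List.pyGetD nP k ' ' := by
      rw [if_pos (by rw [h2]; omega)]
    by_cases hd : PySem.List.pyGetD oP k ' ' ≠ PySem.List.pyGetD nP k ' '
    · -- column k differs
      have hfil : ∀ t : List Int, (k :: t).filter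
          (fun i => decide (PySem.List.pyGetD oP i ' ' ≠ PySem.List.pyGetD nP i ' '))
          = k :: t.filter (fun i => decide (PySem.List.pyGetD oP i ' ' ≠ PySem.List.pyGetD nP i ' ')) := by
        intro t; rw [List.filter_cons, if_pos (by simpa using hd)]
      constructor
      · intro acc c
        have hstep : aStep oP nP (acc, false, c) k = (acc, true, k) := by
          simp only [aStep, hgo, hgn, if_pos hd]; rfl
        rw [List.foldl_cons, hstep, hfil, (hIH.2 acc k hk0 (by omega))]
        rw [PySem.List.pyRange_one_singleton]
        rfl
      · intro acc cs hcs0 hcsk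
        have hstep : aStep oP nP (acc, true, cs) k = (acc, true, cs) := by
          simp only [aStep, hgo, hgn, if_pos hd]; rfl
        rw [List.foldl_cons, hstep, hfil, (hIH.2 acc cs hcs0 (by omega))]
        rw [PySem.List.pyRange_one_succ_right (by omega)]
        simp
    · -- column k agrees
      have hfil : ∀ t : List Int, (k :: t).filter
          (fun i => decide (PySem.List.pyGetD oP i ' ' ≠ PySem.List.pyGetD nP i ' '))
          = t.filter (fun i => decide (PySem.List.pyGetD oP i ' ' ≠ PySem.List.pyGetD nP i ' ')) := by
        intro t; rw [List.filter_cons, if_neg (by simpa using hd)]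
      constructor
      · intro acc c
        have hstep : aStep oP nP (acc, false, c) k = (acc, false, c) := by
          simp only [aStep, hgo, hgn, if_neg hd]; rfl
        rw [List.foldl_cons, hstep, hfil, (hIH.1 acc c)]
      · intro acc cs hcs0 hcsk
        have hstep : aStep oP nP (acc, true, cs) k
            = (acc ++ [(cs, k, String.ofList (PySem.List.slice nP (some cs) (some k)))], false, cs) := by
          simp only [aStep, hgo, hgn, if_neg hd]; rfl
        rw [List.foldl_cons, hstep, hfil, (hIH.1 _ cs)]
        -- B side: chomp the run cs..k-1, which stops before the filtered tail (all > k)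
        have hrest : ∀ x ∈ (PySem.List.pyRange (k + 1) (n : Int) 1).filter
            (fun i => decide (PySem.List.pyGetD oP i ' ' ≠ PySem.List.pyGetD nP i ' ')),
            cs + 1 + (((k - cs - 1).toNat : Nat) : Int) < x := by
          intro x hx
          have := mem_filter_range_lt hx
          omega
        have hrun := bChomp_run ((k - cs - 1).toNat) cs _ hrest
        rw [show cs + 1 + (((k - cs - 1).toNat : Nat) : Int) = k by omega] at hrun
        rw [PySem.List.pyRange_one_cons hcsk, List.cons_append, bBlocks, hrun]
        have he : cs + (((k - cs - 1).toNat : Nat) : Int) + 1 = k := by omega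
        simp only [he, if_neg (by omega : ¬ k = (n : Int))]
        simp

theorem find_line_changes_py_eq_alt (old_line new_line : String) :
    find_line_changes_py old_line new_line = find_line_changes_py_alt old_line new_line := by
  unfold find_line_changes_py find_line_changes_py_alt
  by_cases h : old_line == new_line
  · rw [if_pos h, if_pos h]
  · rw [if_neg h, if_neg h]
    set L : Int := max (PySem.Str.len old_line) (PySem.Str.len new_line) with hLdef
    have hlen : ∀ s : String, PySem.Str.len s = (s.toList.length : Int) := by
      intro s; simp [PySem.Str.len_eq, String.length_toList]
    have hlo : old_line.toList.length ≤ L.toNat := by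
      have h1 : PySem.Str.len old_line ≤ L := le_max_left _ _
      rw [hlen] at h1; omega
    have hln : new_line.toList.length ≤ L.toNat := by
      have h1 : PySem.Str.len new_line ≤ L := le_max_right _ _
      rw [hlen] at h1; omega
    have hL0 : 0 ≤ L := le_trans (by rw [hlen]; positivity) (le_max_left (PySem.Str.len old_line) _)
    have hLn : L = (L.toNat : Int) := (Int.toNat_of_nonneg hL0).symm
    rw [hLn]
    exact (loop_eq L.toNat (pyLjust old_line.toList L.toNat) (pyLjust new_line.toList L.toNat)
      L.toNat (length_pyLjust _ _ hlo) (length_pyLjust _ _ hln) 0 le_rfl (by omega)).1 [] 0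

-- ===== VERDICT (by name: the statement is the Claim_ definition above) =====
theorem find_line_changes_py_spec : Claim_equal_find_line_changes_py := by
  intro old_line new_line _
  exact find_line_changes_py_eq_alt old_line new_line
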